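-- pv_equiv track=rewrite | github.com/FAN1215FAN/HEEG_Auto | tests/support/case_catalog.py | _resolve_directory_tokens
-- ===== SOURCE A (Python) =====
-- def _normalize_directory_text(text: str) -> str:
--     normalized = text.strip().replace("\\", "/").replace("，", "/")
--     return "/".join(part.strip() for part in normalized.split("/") if part.strip())
--
-- def _resolve_directory_tokens(tokens: list[str], available_directories: set[str]) -> set[str]:
--     segment_map: dict[str, list[str]] = {}
--     for directory in available_directories:
--         normalized_directory = _normalize_directory_text(directory)
--         for segment in [part for part in normalized_directory.split("/") if part]:
--             segment_map.setdefault(segment, []).append(directory)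
--     resolved: set[str] = set()
--     for token in tokens:
--         normalized_token = _normalize_directory_text(token)
--         if not normalized_token:
--             continue
--         matches = segment_map.get(normalized_token, [])
--         if normalized_token in available_directories:
--             matches = [normalized_token]
--         if len(matches) == 1:
--             resolved.add(matches[0])
--             continue
--         if len(matches) > 1:
--             joined = "、".join(sorted(matches))
--             raise ValueError(f"文件夹名称匹配到多个目录：{joined}。请改成更具体且唯一的文件夹名称。")
--         raise ValueError(f"无效文件夹：{token}。请输入存在的正式 case 目录名称。")
--     return resolved
-- ===== SOURCE B (Python) =====
-- def _normalize_directory_text(text: str) -> str: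
--     normalized = text.strip().replace("\\", "/").replace("，", "/")
--     return "/".join(part.strip() for part in normalized.split("/") if part.strip())
--
-- def _resolve_directory_tokens(tokens: list[str], available_directories: set[str]) -> set[str]:
--     # No precomputed segment index: each token rescans the directories directly.
--     resolved: set[str] = set()
--     for token in tokens:
--         normalized_token = _normalize_directory_text(token)
--         if not normalized_token:
--             continue
--         if normalized_token in available_directories:
--             matches = [normalized_token]
--         else:
--             matches = [
--                 directory
--                 for directory in available_directories
--                 for segment in _normalize_directory_text(directory).split("/")
--                 if segment and segment == normalized_token
--             ]
--         if len(matches) == 1: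
--             resolved.add(matches[0])
--         elif matches:
--             joined = "、".join(sorted(matches))
--             raise ValueError(f"文件夹名称匹配到多个目录：{joined}。请改成更具体且唯一的文件夹名称。")
--         else:
--             raise ValueError(f"无效文件夹：{token}。请输入存在的正式 case 目录名称。")
--     return resolved
-- ===== Notes on version B (the rewrite author's own statement) =====
-- stated objective: simpler
-- what changed: Drops A's precomputed segment->directories dictionary entirely; B resolves each token by scanning available_directories directly and collecting every segment occurrence equal to the normalized token, keeping the raw-membership override and the same error behaviour.
import Mathlib
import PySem

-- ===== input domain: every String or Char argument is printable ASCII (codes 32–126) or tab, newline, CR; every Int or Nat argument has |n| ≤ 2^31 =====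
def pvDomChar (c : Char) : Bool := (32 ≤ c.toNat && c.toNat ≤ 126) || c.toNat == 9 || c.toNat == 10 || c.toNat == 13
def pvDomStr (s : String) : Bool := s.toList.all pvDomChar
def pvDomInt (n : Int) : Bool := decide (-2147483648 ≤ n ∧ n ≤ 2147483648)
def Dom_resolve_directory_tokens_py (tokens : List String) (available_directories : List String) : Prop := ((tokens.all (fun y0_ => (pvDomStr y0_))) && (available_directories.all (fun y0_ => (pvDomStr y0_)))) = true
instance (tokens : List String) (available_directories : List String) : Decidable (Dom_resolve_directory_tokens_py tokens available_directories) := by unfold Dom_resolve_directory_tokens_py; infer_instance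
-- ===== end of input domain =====

-- B drops A's precomputed segment->directories dictionary and rescans the directory
-- list per token (same values, same error behaviour); objective: simpler.


-- shared helper (_normalize_directory_text, used verbatim by both Pythons)
def pvNorm (text : String) : String :=
  let normalized := PySem.Str.replace (PySem.Str.replace (PySem.Str.strip text) "\\" "/") "，" "/"
  PySem.Str.join "/" ((((PySem.Str.split? normalized "/").getD []).map (fun part => PySem.Str.strip part)).filter (fun part => part ≠ ""))

-- the nonempty '/'-segments of a normalized directory text
def pvSegs (directory : String) : List String :=
  ((PySem.Str.split? (pvNorm directory) "/").getD []).filter (fun part => part ≠ "")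

-- ===== PORT A =====
-- the raising branches (no match / several matching directories) are outside Pre_; the port leaves
-- 'resolved' unchanged there
def pvBuildSegmentMap (available_directories : List String) : PySem.Dict String (List String) :=
  available_directories.foldl (fun m directory =>
    (pvSegs directory).foldl (fun m segment => m.modify segment [] (fun l => l ++ [directory])) m)
    PySem.Dict.empty

def resolve_directory_tokens_py (tokens : List String) (available_directories : List String) : List String :=
  let segmentMap : PySem.Dict String (List String) := pvBuildSegmentMap available_directories
  tokens.foldl (fun resolved token =>
    let nt := pvNorm token
    if nt = "" then resolved
    else
      let ms := segmentMap.getD nt []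
      let ms := if nt ∈ available_directories then [nt] else ms
      if ms.length = 1 then PySem.Set.add resolved (ms.headD "")
      else resolved) []

-- ===== PORT B =====
def resolve_directory_tokens_py_alt (tokens : List String) (available_directories : List String) : List String :=
  tokens.foldl (fun resolved token =>
    let nt := pvNorm token
    if nt = "" then resolved
    else
      let ms :=
        if nt ∈ available_directories then [nt]
        else available_directories.flatMap (fun directory =>
          ((pvSegs directory).filter (fun segment => segment == nt)).map (fun _ => directory))
      if ms.length = 1 then PySem.Set.add resolved (ms.headD "")
      else resolved) []

-- ===== PRECONDITION & SPEC =====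
-- Pre_ excludes exactly the inputs on which Python A raises ValueError: a token whose
-- normalization is nonempty, is not itself an available directory, and occurs as a
-- segment of the available directories a number of times ≠ 1.
def Pre_resolve_directory_tokens_py (tokens : List String) (available_directories : List String) : Prop :=
  ∀ token ∈ tokens, pvNorm token = "" ∨ pvNorm token ∈ available_directories ∨
    (available_directories.map (fun d => (pvSegs d).count (pvNorm token))).sum = 1
instance (tokens : List String) (available_directories : List String) : Decidable (Pre_resolve_directory_tokens_py tokens available_directories) := by unfold Pre_resolve_directory_tokens_py; infer_instance

def pvWitness_resolve_directory_tokens_py : List String × List String := (["a", " c/d "], ["a/b", "c/d"])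

def Spec_resolve_directory_tokens_py (tokens : List String) (available_directories : List String) (out : List String) : Prop := out = resolve_directory_tokens_py_alt tokens available_directories
instance (tokens : List String) (available_directories : List String) (out : List String) : Decidable (Spec_resolve_directory_tokens_py tokens available_directories out) := by unfold Spec_resolve_directory_tokens_py; infer_instance

-- ===== CLAIM (what is proved, stated in full; the proofs are below) =====
def Claim_equal_resolve_directory_tokens_py : Prop := ∀ (tokens : List String) (available_directories : List String), Dom_resolve_directory_tokens_py tokens available_directories → Pre_resolve_directory_tokens_py tokens available_directories → Spec_resolve_directory_tokens_py tokens available_directories (resolve_directory_tokens_py tokens available_directories)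

-- ===== LEMMAS AND PROOFS =====

-- A's nested build loop, flattened to one fold over (segment, directory) pairs
lemma pvBuild_eq_pairs (l : List String) (m : PySem.Dict String (List String)) :
    l.foldl (fun m directory =>
      (pvSegs directory).foldl (fun m segment => m.modify segment [] (fun l => l ++ [directory])) m) m
    = (l.flatMap (fun d => (pvSegs d).map (fun s => (s, d)))).foldl
        (fun m p => m.modify p.1 [] (fun l => l ++ [p.2])) m := by
  induction l generalizing m with
  | nil => rfl
  | cons d l ih =>
      simp only [List.foldl_cons, List.flatMap_cons, List.foldl_append, ih, List.foldl_map]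

-- the segment map's lookup equals B's direct scan
lemma pvMap_getD (avail : List String) (nt : String) :
    (pvBuildSegmentMap avail).getD nt []
    = avail.flatMap (fun directory =>
        ((pvSegs directory).filter (fun segment => segment == nt)).map (fun _ => directory)) := by
  rw [pvBuildSegmentMap, pvBuild_eq_pairs, PySem.Dict.getD_foldl_modify_append]
  simp only [PySem.Dict.getD_empty, List.nil_append]
  induction avail with
  | nil => rfl
  | cons d l ih =>
      simp only [List.flatMap_cons, List.filter_append, List.map_append, ih, List.filter_map,
        Function.comp_def, List.map_map]

-- ===== VERDICT =====
theorem resolve_directory_tokens_py_spec : Claim_equal_resolve_directory_tokens_py := by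
  intro tokens avail _ _
  unfold Spec_resolve_directory_tokens_py
  unfold resolve_directory_tokens_py resolve_directory_tokens_py_alt
  simp only [pvMap_getD]
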